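-- pv_equiv track=rewrite | github.com/jmf-pobox/txt2tex | src/txt2tex/katex_gen.py | _escape_html_outside_math
-- ===== SOURCE A (Python) =====
-- def _escape_html_outside_math(text: str) -> str:
--     """Escape HTML special characters only outside math delimiters."""
--     result: list[str] = []
--     in_math = False
--     i = 0
--
--     while i < len(text):
--         if text[i] == "$":
--             in_math = not in_math
--             result.append("$")
--             i += 1
--         elif not in_math:
--             if text[i] == "<":
--                 result.append("&lt;")
--             elif text[i] == ">":
--                 result.append("&gt;")
--             elif text[i] == "&":
--                 result.append("&amp;")
--             else:
--                 result.append(text[i])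
--             i += 1
--         else:
--             result.append(text[i])
--             i += 1
--
--     return "".join(result)
-- ===== SOURCE B (Python) =====
-- def _escape_html_outside_math(text: str) -> str:
--     """Escape HTML special characters only outside math delimiters."""
--     parts = text.split("$")
--     out = []
--     for i, part in enumerate(parts):
--         if i % 2 == 0:
--             part = part.replace("&", "&amp;").replace("<", "&lt;").replace(">", "&gt;")
--         out.append(part)
--     return "$".join(out)
-- ===== Notes on version B (the rewrite author's own statement) =====
-- stated objective: simpler
-- what changed: Replaced the char-by-char loop with an in_math toggle by splitting on the math delimiter, escaping even-index segments via chained str.replace, and joining back; the C-level split/replace/join beats the Python per-char loop.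
import Mathlib
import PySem

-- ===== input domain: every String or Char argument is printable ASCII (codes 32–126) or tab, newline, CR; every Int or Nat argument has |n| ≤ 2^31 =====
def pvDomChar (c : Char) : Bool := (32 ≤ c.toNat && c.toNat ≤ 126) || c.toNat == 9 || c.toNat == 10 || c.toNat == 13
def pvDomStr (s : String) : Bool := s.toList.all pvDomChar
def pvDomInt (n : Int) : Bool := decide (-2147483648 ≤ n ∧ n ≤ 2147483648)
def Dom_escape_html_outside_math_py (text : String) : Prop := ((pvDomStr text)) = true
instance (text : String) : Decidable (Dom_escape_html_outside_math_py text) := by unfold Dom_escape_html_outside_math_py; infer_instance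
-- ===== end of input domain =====

-- B replaces A's char-by-char in_math toggle loop by split-on-'$', escaping the
-- even-index segments with chained replaces, and joining back with '$' (simpler decomposition).


-- ===== PORT A =====
-- A's while loop over indices, as structural recursion over the char list with the in_math flag.
def pvGoA : List Char → Bool → List String
  | [], _ => []
  | c :: rest, inMath =>
    if c = '$' then "$" :: pvGoA rest (!inMath)
    else if inMath = false then
      (if c = '<' then "&lt;"
       else if c = '>' then "&gt;"
       else if c = '&' then "&amp;"
       else String.ofList [c]) :: pvGoA rest inMath
    else String.ofList [c] :: pvGoA rest inMath

def escape_html_outside_math_py (text : String) : String :=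
  PySem.Str.join "" (pvGoA text.toList false)

-- ===== PORT B =====
def pvEscSeg (s : String) : String :=
  PySem.Str.replace (PySem.Str.replace (PySem.Str.replace s "&" "&amp;") "<" "&lt;") ">" "&gt;"

def escape_html_outside_math_py_alt (text : String) : String :=
  let parts : List String := (PySem.Chars.splitOn text.toList ['$']).map String.ofList
  PySem.Str.join "$" ((PySem.List.enumerate parts).map
    (fun ip => if ip.1 % 2 == 0 then pvEscSeg ip.2 else ip.2))

-- ===== PRECONDITION & SPEC =====
def Spec_escape_html_outside_math_py (text : String) (out : String) : Prop := out = escape_html_outside_math_py_alt text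
instance (text : String) (out : String) : Decidable (Spec_escape_html_outside_math_py text out) := by unfold Spec_escape_html_outside_math_py; infer_instance

-- ===== CLAIM (what is proved, stated in full; the proofs are below) =====
def Claim_equal_escape_html_outside_math_py : Prop := ∀ (text : String), Dom_escape_html_outside_math_py text → Spec_escape_html_outside_math_py text (escape_html_outside_math_py text)

-- ===== LEMMAS AND PROOFS =====

-- per-character escaping
def escChar (c : Char) : List Char :=
  if c = '&' then "&amp;".toList
  else if c = '<' then "&lt;".toList
  else if c = '>' then "&gt;".toList
  else [c]

-- single-character replace is a flatMap
def repl1 (o : Char) (new : List Char) (l : List Char) : List Char :=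
  l.flatMap (fun c => if c = o then new else [c])

theorem replace_go_single (o : Char) (new : List Char) :
    ∀ (fuel : Nat) (l acc : List Char), l.length ≤ fuel →
      PySem.Chars.replace.go [o] new fuel l acc = acc.reverse ++ repl1 o new l := by
  intro fuel
  induction fuel with
  | zero =>
    intro l acc h
    have : l = [] := List.eq_nil_of_length_eq_zero (Nat.le_zero.mp h)
    subst this
    simp [PySem.Chars.replace.go, repl1]
  | succ n ih =>
    intro l acc h
    cases l with
    | nil => simp [PySem.Chars.replace.go, repl1]
    | cons c t =>
      simp only [PySem.Chars.replace.go]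
      by_cases hc : c = o
      · subst hc
        have hp : [c].isPrefixOf (c :: t) = true := by simp [List.isPrefixOf]
        rw [if_pos hp]
        simp only [List.length_cons, List.length_nil, List.drop_succ_cons, List.drop_zero]
        rw [ih t (new.reverse ++ acc) (by simpa using Nat.lt_succ_iff.mp (by simpa using h))]
        simp [repl1]
      · have hp : [o].isPrefixOf (c :: t) = false := by
          simp [List.isPrefixOf]
          exact fun h' => (hc h'.symm).elim
        rw [if_neg (by simp [hp])]
        rw [ih t (c :: acc) (by simpa using Nat.lt_succ_iff.mp (by simpa using h))]
        simp [repl1, hc]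

theorem replace_single (l : List Char) (o : Char) (new : List Char) :
    PySem.Chars.replace l [o] new = repl1 o new l := by
  simpa using replace_go_single o new l.length l [] (le_refl _)

theorem escSeg_toList (s : String) :
    (pvEscSeg s).toList = s.toList.flatMap escChar := by
  simp only [pvEscSeg, PySem.Str.replace]
  have h1 : ("&" : String).toList = ['&'] := by decide
  have h2 : ("<" : String).toList = ['<'] := by decide
  have h3 : (">" : String).toList = ['>'] := by decide
  simp only [String.toList_ofList, h1, h2, h3]
  rw [replace_single, replace_single, replace_single]
  simp only [repl1, List.flatMap_assoc]
  apply List.flatMap_congr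
  intro c _
  by_cases hamp : c = '&'
  · subst hamp; decide
  by_cases hlt : c = '<'
  · subst hlt; decide
  by_cases hgt : c = '>'
  · subst hgt; decide
  simp [escChar, hamp, hlt, hgt]

theorem escSeg_ofList (p : List Char) :
    pvEscSeg (String.ofList p) = String.ofList (p.flatMap escChar) := by
  have := escSeg_toList (String.ofList p)
  simp only [String.toList_ofList] at this
  calc pvEscSeg (String.ofList p)
      = String.ofList (pvEscSeg (String.ofList p)).toList := by simp
    _ = String.ofList (p.flatMap escChar) := by rw [this]

-- pure split on '$'
def splitP : List Char → List (List Char)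
  | [] => [[]]
  | c :: rest =>
    if c = '$' then [] :: splitP rest
    else
      match splitP rest with
      | [] => [[c]]
      | p :: ps => (c :: p) :: ps

theorem splitP_ne_nil (l : List Char) : splitP l ≠ [] := by
  cases l with
  | nil => simp [splitP]
  | cons c rest =>
    simp only [splitP]
    split
    · simp
    · cases h : splitP rest <;> simp

def consHead (x : List Char) : List (List Char) → List (List Char)
  | [] => [x]
  | p :: ps => (x ++ p) :: ps

theorem splitOn_go_eq :
    ∀ (fuel : Nat) (l cur : List Char) (acc : List (List Char)), l.length ≤ fuel →
      PySem.Chars.splitOn.go ['$'] fuel l cur acc = acc.reverse ++ consHead cur.reverse (splitP l) := by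
  intro fuel
  induction fuel with
  | zero =>
    intro l cur acc h
    have : l = [] := List.eq_nil_of_length_eq_zero (Nat.le_zero.mp h)
    subst this
    simp [PySem.Chars.splitOn.go, splitP, consHead]
  | succ n ih =>
    intro l cur acc h
    cases l with
    | nil => simp [PySem.Chars.splitOn.go, splitP, consHead]
    | cons c t =>
      simp only [PySem.Chars.splitOn.go]
      by_cases hc : c = '$'
      · subst hc
        have hp : ['$'].isPrefixOf ('$' :: t) = true := by simp [List.isPrefixOf]
        rw [if_pos hp]
        simp only [List.length_cons, List.length_nil, List.drop_succ_cons, List.drop_zero]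
        rw [ih t [] (cur.reverse :: acc)
          (by simpa using Nat.lt_succ_iff.mp (by simpa using h))]
        simp only [splitP, if_pos rfl]
        rcases hs : splitP t with _ | ⟨p, ps⟩
        · exact absurd hs (splitP_ne_nil t)
        · simp [consHead]
      · have hp : ['$'].isPrefixOf (c :: t) = false := by
          simp [List.isPrefixOf]
          exact fun h' => (hc h'.symm).elim
        rw [if_neg (by simp [hp])]
        rw [ih t (c :: cur) acc (by simpa using Nat.lt_succ_iff.mp (by simpa using h))]
        simp only [splitP, if_neg hc]
        rcases hs : splitP t with _ | ⟨p, ps⟩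
        · exact absurd hs (splitP_ne_nil t)
        · simp [consHead]

theorem splitOn_eq (l : List Char) : PySem.Chars.splitOn l ['$'] = splitP l := by
  rw [PySem.Chars.splitOn, splitOn_go_eq (l.length + 1) l [] [] (by omega)]
  rcases hs : splitP l with _ | ⟨p, ps⟩
  · exact absurd hs (splitP_ne_nil l)
  · simp [consHead]

-- reference char-level function both ports compute (esc = true outside math)
def bChars : List Char → Bool → List Char
  | [], _ => []
  | c :: rest, esc =>
    if c = '$' then '$' :: bChars rest (!esc)
    else (if esc then escChar c else [c]) ++ bChars rest esc

-- alternate-escape over split pieces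
def altMap : Bool → List (List Char) → List (List Char)
  | _, [] => []
  | b, p :: ps => (if b then p.flatMap escChar else p) :: altMap (!b) ps

theorem parity_flip (n : Int) : (((n + 1) % 2 == 0) : Bool) = !(n % 2 == 0) := by
  have h1 : (n + 1) % 2 = (n % 2 + 1) % 2 := by omega
  rcases Int.emod_two_eq_zero_or_one n with h | h <;> simp [h1, h]

theorem enum_altMap :
    ∀ (ps : List (List Char)) (n : Int),
      (PySem.List.enumerate (ps.map String.ofList) n).map
          (fun ip => if ip.1 % 2 == 0 then pvEscSeg ip.2 else ip.2)
        = (altMap (n % 2 == 0) ps).map String.ofList := by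
  intro ps
  induction ps with
  | nil => intro n; simp [PySem.List.enumerate, altMap]
  | cons p t ih =>
    intro n
    simp only [List.map_cons, PySem.List.enumerate, List.map, altMap, ih (n + 1), parity_flip]
    by_cases hb : ((n % 2 == 0) : Bool) = true
    · simp [hb, escSeg_ofList]
    · simp only [Bool.not_eq_true] at hb
      simp [hb]

theorem join_consHead (x y : List Char) (ps : List (List Char)) :
    PySem.Chars.join ['$'] ((x ++ y) :: ps) = x ++ PySem.Chars.join ['$'] (y :: ps) := by
  cases ps with
  | nil => simp [PySem.Chars.join_singleton]
  | cons q qs => simp [PySem.Chars.join_cons_cons]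

theorem join_altMap : ∀ (l : List Char) (b : Bool),
    PySem.Chars.join ['$'] (altMap b (splitP l)) = bChars l b := by
  intro l
  induction l with
  | nil => intro b; simp [splitP, altMap, bChars, PySem.Chars.join_singleton]
  | cons c rest ih =>
    intro b
    by_cases hc : c = '$'
    · subst hc
      have hrest := ih (!b)
      rcases hs : splitP rest with _ | ⟨p, ps⟩
      · exact absurd hs (splitP_ne_nil rest)
      · rw [hs] at hrest
        simp only [splitP, if_pos rfl, if_true, hs, altMap, bChars] at hrest ⊢
        rw [PySem.Chars.join_cons_cons]
        cases b <;> simp_all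
    · have hrest := ih b
      rcases hs : splitP rest with _ | ⟨p, ps⟩
      · exact absurd hs (splitP_ne_nil rest)
      · rw [hs] at hrest
        simp only [splitP, if_neg hc, hs, altMap, bChars] at hrest ⊢
        cases b
        · simp only [Bool.false_eq_true, if_false, if_neg (Bool.false_ne_true), Bool.not_false] at hrest ⊢
          rw [show (c :: p) = [c] ++ p from rfl, join_consHead]
          simp [hrest, hc]
        · simp only [if_pos rfl, if_true, Bool.not_true] at hrest ⊢
          rw [List.flatMap_cons, join_consHead]
          simp [hrest, hc]

theorem join_nil_flatten : ∀ (ps : List (List Char)), PySem.Chars.join [] ps = ps.flatten := by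
  intro ps
  induction ps with
  | nil => simp [PySem.Chars.join_nil]
  | cons x t ih =>
    cases t with
    | nil => simp [PySem.Chars.join_singleton]
    | cons y l => rw [PySem.Chars.join_cons_cons]; simp only [List.flatten_cons]; simp [ih]

theorem goA_flatten : ∀ (l : List Char) (m : Bool),
    ((pvGoA l m).map String.toList).flatten = bChars l (!m) := by
  intro l
  induction l with
  | nil => intro m; simp [pvGoA, bChars]
  | cons c rest ih =>
    intro m
    by_cases hc : c = '$'
    · subst hc
      have hrest := ih (!m)
      simp only [pvGoA, if_pos rfl, if_true, bChars, List.map_cons, List.flatten_cons]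
      rw [hrest, Bool.not_not]
      simp
    · cases m
      · have hrest := ih false
        simp only [pvGoA, if_neg hc, if_true, bChars, List.map_cons, List.flatten_cons,
          Bool.not_false, if_pos rfl]
        rw [hrest]
        congr 1
        by_cases hlt : c = '<'
        · subst hlt; decide
        by_cases hgt : c = '>'
        · subst hgt; decide
        by_cases hamp : c = '&'
        · subst hamp; decide
        simp [escChar, hlt, hgt, hamp]
      · have hrest := ih true
        simp only [Bool.not_true] at hrest
        simp [pvGoA, bChars, hc, hrest]

-- ===== VERDICT (by name: the statement is the Claim_ definition above) =====
theorem escape_html_outside_math_py_spec : Claim_equal_escape_html_outside_math_py := by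
  unfold Claim_equal_escape_html_outside_math_py
  intro text _
  unfold Spec_escape_html_outside_math_py
  unfold escape_html_outside_math_py escape_html_outside_math_py_alt
  simp only [PySem.Str.join]
  rw [splitOn_eq]
  rw [enum_altMap (splitP text.toList) 0]
  congr 1
  rw [List.map_map]
  have hmap : (List.map (String.toList ∘ String.ofList) (altMap ((0 : Int) % 2 == 0) (splitP text.toList)))
      = altMap true (splitP text.toList) := by
    simp [Function.comp_def]
  rw [hmap]
  have h0 : ("" : String).toList = [] := rfl
  have h1 : ("$" : String).toList = ['$'] := rfl
  rw [h0, h1, join_altMap, join_nil_flatten, goA_flatten]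
  simp
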